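-- pv_equiv track=rewrite | github.com/UditAnand85/100-days-Coding-Challenge | Day24/DivideChocolates.py | getMaximumSweetness
-- ===== SOURCE A (Python) =====
-- def getMaximumSweetness(arr, k):
--
--     def canDivide(target):
--         pieces = 0
--         total = 0
--         for s in arr:
--             total += s
--             if total >= target:
--                 pieces += 1
--                 total = 0
--         return pieces >= (k + 1)
--
--     low = 1
--     high = sum(arr)
--     answer = 0
--
--     while low <= high:
--         mid = (low + high) // 2
--
--         if canDivide(mid):
--             answer = mid
--             low = mid + 1
--         else:
--             high = mid - 1
--
--     return answer
-- ===== SOURCE B (Python) =====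
-- def getMaximumSweetness(arr, k):
--     need = k + 1
--     total_sum = sum(arr)
--
--     def enough(target):
--         # early-exit greedy: True iff greedy cutting yields at least `need` pieces
--         if need <= 0:
--             return True
--         left = need
--         total = 0
--         for s in arr:
--             total += s
--             if total >= target:
--                 left -= 1
--                 if left == 0:
--                     return True
--                 total = 0
--         return False
--
--     def search(lo, hi):
--         # largest probed target in [lo, hi] satisfying `enough`, or None
--         if lo > hi:
--             return None
--         mid = (lo + hi) // 2
--         if enough(mid):
--             best = search(mid + 1, hi)
--             return mid if best is None else best
--         return search(lo, mid - 1)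
--
--     res = search(1, total_sum)
--     return 0 if res is None else res
-- ===== Notes on version B (the rewrite author's own statement) =====
-- stated objective: alternative
-- what changed: Replaces the mutable low/high/answer while-loop by a top-down recursive search returning an Optional best from the upper half, and replaces the count-all-pieces-then-compare feasibility scan by an early-exit countdown scan with an up-front k+1<=0 short-circuit.
import Mathlib
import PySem

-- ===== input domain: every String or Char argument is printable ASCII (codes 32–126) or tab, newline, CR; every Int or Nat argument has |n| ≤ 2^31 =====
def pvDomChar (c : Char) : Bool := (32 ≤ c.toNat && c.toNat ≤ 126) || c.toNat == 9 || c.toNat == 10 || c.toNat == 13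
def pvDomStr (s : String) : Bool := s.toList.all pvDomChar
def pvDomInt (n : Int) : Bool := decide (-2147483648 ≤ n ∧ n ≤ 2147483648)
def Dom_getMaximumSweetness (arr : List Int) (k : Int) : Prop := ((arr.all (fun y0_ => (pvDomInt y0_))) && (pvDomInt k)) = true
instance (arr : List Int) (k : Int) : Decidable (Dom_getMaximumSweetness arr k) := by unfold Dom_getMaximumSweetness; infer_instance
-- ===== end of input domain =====

-- B replaces A's mutable low/high/answer loop by a top-down recursive search returning an
-- Optional best, and the count-all-pieces scan by an early-exit countdown scan (objective: alternative).


-- ===== PORT A =====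
-- canDivide(target): full scan counting pieces, then compare with k+1
def pvA_canDivide (arr : List Int) (k target : Int) : Bool :=
  let st := arr.foldl
    (fun (pt : Int × Int) s =>
      let total := pt.2 + s
      if total ≥ target then (pt.1 + 1, (0 : Int)) else (pt.1, total))
    ((0 : Int), (0 : Int))
  decide (st.1 ≥ k + 1)

-- the while-loop with low/high/answer state (fuel = a totality guard; never exhausted on the call below)
def pvA_loop (arr : List Int) (k : Int) (fuel : Nat) (low high answer : Int) : Int :=
  match fuel with
  | 0 => answer
  | Nat.succ f =>
    if low ≤ high then
      let mid := PySem.Int.floordiv (low + high) 2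
      if pvA_canDivide arr k mid then pvA_loop arr k f (mid + 1) high mid
      else pvA_loop arr k f low (mid - 1) answer
    else answer

def getMaximumSweetness (arr : List Int) (k : Int) : Int :=
  pvA_loop arr k (arr.sum).toNat 1 arr.sum 0

-- ===== PORT B =====
-- early-exit greedy scan: countdown `left`, return true as soon as it reaches 0
def pvB_scan (target total left : Int) : List Int → Bool
  | [] => false
  | s :: rest =>
    let total := total + s
    if total ≥ target then
      let left := left - 1
      if left = 0 then true else pvB_scan target 0 left rest
    else pvB_scan target total left rest

def pvB_enough (arr : List Int) (need target : Int) : Bool :=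
  if need ≤ 0 then true else pvB_scan target 0 need arr

-- top-down recursive search, Optional best from the upper half, no accumulator
-- (fuel = a totality guard; never exhausted on the call below)
def pvB_search (arr : List Int) (need : Int) (fuel : Nat) (lo hi : Int) : Option Int :=
  match fuel with
  | 0 => none
  | Nat.succ f =>
    if lo > hi then none
    else
      let mid := PySem.Int.floordiv (lo + hi) 2
      if pvB_enough arr need mid then
        match pvB_search arr need f (mid + 1) hi with
        | none => some mid
        | some v => some v
      else pvB_search arr need f lo (mid - 1)

def getMaximumSweetness_alt (arr : List Int) (k : Int) : Int :=
  let need := k + 1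
  let totalSum := arr.sum
  match pvB_search arr need totalSum.toNat 1 totalSum with
  | none => 0
  | some v => v

-- ===== PRECONDITION & SPEC =====
def Spec_getMaximumSweetness (arr : List Int) (k : Int) (out : Int) : Prop := out = getMaximumSweetness_alt arr k
instance (arr : List Int) (k : Int) (out : Int) : Decidable (Spec_getMaximumSweetness arr k out) := by unfold Spec_getMaximumSweetness; infer_instance

-- ===== CLAIM (what is proved, stated in full; the proofs are below) =====
def Claim_equal_getMaximumSweetness : Prop := ∀ (arr : List Int) (k : Int), Dom_getMaximumSweetness arr k → Spec_getMaximumSweetness arr k (getMaximumSweetness arr k)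

-- ===== LEMMAS AND PROOFS =====

-- the piece-counting fold of A, abbreviated for the lemmas
def pvStep (target : Int) (pt : Int × Int) (s : Int) : Int × Int :=
  let total := pt.2 + s
  if total ≥ target then (pt.1 + 1, (0 : Int)) else (pt.1, total)

theorem pvA_fold_shift (target : Int) (arr : List Int) :
    ∀ p t : Int, (arr.foldl (pvStep target) (p, t)).1 = p + (arr.foldl (pvStep target) (0, t)).1 := by
  induction arr with
  | nil => intro p t; simp
  | cons s rest ih =>
    intro p t
    simp only [List.foldl_cons, pvStep]
    by_cases hc : t + s ≥ target
    · simp only [hc, if_pos]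
      rw [ih (p + 1) 0, ih (0 + 1) 0]; ring
    · simp only [hc, if_neg, not_false_iff]
      exact ih p (t + s)

theorem pvA_fold_nonneg (target : Int) (arr : List Int) :
    ∀ t : Int, 0 ≤ (arr.foldl (pvStep target) (0, t)).1 := by
  induction arr with
  | nil => intro t; simp
  | cons s rest ih =>
    intro t
    simp only [List.foldl_cons, pvStep]
    by_cases hc : t + s ≥ target
    · simp only [hc, if_pos]
      rw [pvA_fold_shift]
      have := ih 0; omega
    · simp only [hc, if_neg, not_false_iff]
      exact ih (t + s)

theorem pvB_scan_eq (target : Int) (arr : List Int) :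
    ∀ total left : Int, 1 ≤ left →
      pvB_scan target total left arr
        = decide (left ≤ (arr.foldl (pvStep target) (0, total)).1) := by
  induction arr with
  | nil => intro total left hl; simp [pvB_scan]; omega
  | cons s rest ih =>
    intro total left hl
    simp only [pvB_scan, List.foldl_cons, pvStep]
    by_cases hc : total + s ≥ target
    · simp only [hc, if_pos]
      rw [pvA_fold_shift]
      have hnn := pvA_fold_nonneg target rest 0
      by_cases h1 : left - 1 = 0
      · simp only [h1, if_pos]
        have : left = 1 := by omega
        subst this
        simp; omega
      · simp only [h1, if_neg, not_false_iff]
        rw [ih 0 (left - 1) (by omega)]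
        simp only [decide_eq_decide]
        omega
    · simp only [hc, if_neg, not_false_iff]
      exact ih (total + s) left hl

theorem pvB_enough_eq (arr : List Int) (k target : Int) :
    pvB_enough arr (k + 1) target = pvA_canDivide arr k target := by
  unfold pvB_enough pvA_canDivide
  have hfold : (arr.foldl (fun (pt : Int × Int) s =>
      let total := pt.2 + s
      if total ≥ target then (pt.1 + 1, (0 : Int)) else (pt.1, total)) ((0 : Int), (0 : Int)))
      = arr.foldl (pvStep target) ((0 : Int), (0 : Int)) := rfl
  rw [hfold]
  by_cases h : k + 1 ≤ 0
  · have hnn := pvA_fold_nonneg target arr 0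
    simp only [h, if_pos]
    have hge : (arr.foldl (pvStep target) ((0 : Int), (0 : Int))).1 ≥ k + 1 := by omega
    simp [hge]
  · simp only [h, if_neg, not_false_iff]
    rw [pvB_scan_eq target arr 0 (k + 1) (by omega)]

theorem pv_loop_search (arr : List Int) (k : Int) :
    ∀ fuel : Nat, ∀ lo hi ans : Int, (hi + 1 - lo).toNat ≤ fuel →
      pvA_loop arr k fuel lo hi ans
        = (match pvB_search arr (k + 1) fuel lo hi with
           | none => ans
           | some v => v) := by
  intro fuel
  induction fuel with
  | zero => intro lo hi ans _; rfl
  | succ f ih =>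
    intro lo hi ans hm
    by_cases hle : lo ≤ hi
    · have hmid := PySem.Int.floordiv_two_mid_bounds hle
      show (if lo ≤ hi then _ else _) = _
      rw [if_pos hle]
      show _ = (match (if lo > hi then none else _ : Option Int) with
                | none => ans | some v => v)
      rw [if_neg (by omega : ¬ lo > hi)]
      simp only [pvB_enough_eq arr k]
      by_cases hc : pvA_canDivide arr k (PySem.Int.floordiv (lo + hi) 2) = true
      · rw [if_pos hc, if_pos hc]
        rw [ih (PySem.Int.floordiv (lo + hi) 2 + 1) hi (PySem.Int.floordiv (lo + hi) 2) (by omega)]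
        cases pvB_search arr (k + 1) f (PySem.Int.floordiv (lo + hi) 2 + 1) hi <;> simp
      · rw [if_neg hc, if_neg hc]
        exact ih lo (PySem.Int.floordiv (lo + hi) 2 - 1) ans (by omega)
    · show (if lo ≤ hi then _ else _) = _
      rw [if_neg hle]
      show _ = (match (if lo > hi then none else _ : Option Int) with
                | none => ans | some v => v)
      rw [if_pos (by omega : lo > hi)]

-- ===== VERDICT (by name: the statement is the Claim_ definition above) =====
theorem getMaximumSweetness_spec : Claim_equal_getMaximumSweetness := by
  intro arr k _
  unfold Spec_getMaximumSweetness getMaximumSweetness getMaximumSweetness_alt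
  exact pv_loop_search arr k (arr.sum).toNat 1 arr.sum 0 (by omega)
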